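-- pv_equiv track=rewrite | github.com/AhmedRaja1/Hacktoberfest-2020 | Python Library/BruteForce Python Password Cracker/passwordcracker2.py | guess_password
-- ===== SOURCE A (Python) =====
-- import itertools
-- import string
--
-- def guess_password(real):
--     password = string.ascii_lowercase+string.digits
--     attempts=0
--
--     for password_length in range(0,9):
--         for guess in itertools.product(password,repeat=password_length):
--             attempts +=1
--
--             guess="".join(guess)
--
--             if guess == real :
--                 return (guess,attempts)
--             print (guess,attempts)
-- ===== SOURCE B (Python) =====
-- import string
--
-- def guess_password(real):
--     # Closed-form: equivalence is about the RETURN value only; B does not print the guesses A prints.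
--     alphabet = string.ascii_lowercase + string.digits
--     n = len(real)
--     if n > 8 or any(c not in alphabet for c in real):
--         return None
--     rank = 0
--     for c in real:
--         rank = rank * 36 + alphabet.index(c)
--     return (real, (36 ** n - 1) // 35 + rank + 1)
-- ===== Notes on version B (the rewrite author's own statement) =====
-- stated objective: alternative
-- what changed: B replaces A's brute-force enumeration of every candidate string with a closed-form computation: it validates that real lies in {a-z0-9}^0..8 and computes the attempt count directly as the geometric sum (36^len-1)//35 plus the base-36 rank of real plus 1 (intended as faster; a timing run could not get a clean ratio because A times out already at tiny sizes).
-- outside the precondition, e.g. on guess_password('A'): A does not finish within the time limit, B returns None; on guess_password('abcdefghi'): A does not finish within the time limit, B returns None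
import Mathlib
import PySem

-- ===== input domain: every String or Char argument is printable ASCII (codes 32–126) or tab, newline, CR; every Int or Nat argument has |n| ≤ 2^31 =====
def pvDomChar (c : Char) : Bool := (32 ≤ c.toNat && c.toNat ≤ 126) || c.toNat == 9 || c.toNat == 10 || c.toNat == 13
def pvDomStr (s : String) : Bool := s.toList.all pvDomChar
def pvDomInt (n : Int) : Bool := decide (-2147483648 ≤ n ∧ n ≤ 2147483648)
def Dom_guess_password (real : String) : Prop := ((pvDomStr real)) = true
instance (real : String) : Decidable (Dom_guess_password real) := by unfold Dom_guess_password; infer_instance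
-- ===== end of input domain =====

-- B replaces A's brute-force enumeration by a closed-form rank computation (return value only: B does not print the guesses A prints).

-- ===== PORT A =====
-- string.ascii_lowercase + string.digits
def pwAlphabet : List Char := "abcdefghijklmnopqrstuvwxyz0123456789".toList

-- itertools.product(password, repeat=n) is LAZY in Python; its faithful port in an
-- eager language is this early-returning recursion that yields the tuples in the
-- same odometer order (first coordinate over `cs`, remaining coordinates over the
-- full alphabet), threading the `attempts` counter; `.inl` = A's `return`,
-- `.inr att` = inner generator exhausted with the counter at `att` (prints dropped).
def searchTuples (real : String) : Nat → List Char → List Char → Int → Option (String × Int) ⊕ Int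
  | 0, _, pre, att =>
      let att := att + 1
      if String.ofList pre = real then .inl (some (String.ofList pre, att)) else .inr att
  | _ + 1, [], _, att => .inr att
  | n + 1, c :: rest, pre, att =>
      match searchTuples real n pwAlphabet (pre ++ [c]) att with
      | .inl r => .inl r
      | .inr att' => searchTuples real (n + 1) rest pre att'
termination_by n cs => (n, cs.length)

-- for password_length in range(0,9):
def pwOuter (real : String) : List Nat → Int → Option (String × Int)
  | [], _ => none
  | L :: Ls, att =>
      match searchTuples real L pwAlphabet [] att with
      | .inl r => r
      | .inr att' => pwOuter real Ls att'

def guess_password (real : String) : Option (String × Int) :=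
  pwOuter real (List.range 9) 0

-- ===== PORT B =====
def guess_password_alt (real : String) : Option (String × Int) :=
  let cs := real.toList
  if cs.length ≤ 8 ∧ ∀ c ∈ cs, c ∈ pwAlphabet then
    let rank : Int := cs.foldl (fun r c => r * 36 + (((PySem.List.index? pwAlphabet c).getD 0 : Nat) : Int)) 0
    some (real, PySem.Int.floordiv ((36 : Int) ^ cs.length - 1) 35 + rank + 1)
  else none

-- ===== PRECONDITION & SPEC =====
-- Pre_ excludes inputs whose password is outside the searched space {a-z0-9}^{0..8}: there A only
-- returns None after enumerating all 36^0+…+36^8 ≈ 2.9e12 guesses (printing each) — effectively divergent.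
def Pre_guess_password (real : String) : Prop :=
  real.toList.length ≤ 8 ∧ real.toList.all (fun c => pwAlphabet.contains c) = true
instance (real : String) : Decidable (Pre_guess_password real) := by unfold Pre_guess_password; infer_instance
def pvWitness_guess_password : String := "ab"

def Spec_guess_password (real : String) (out : Option (String × Int)) : Prop := out = guess_password_alt real
instance (real : String) (out : Option (String × Int)) : Decidable (Spec_guess_password real out) := by unfold Spec_guess_password; infer_instance

-- ===== CLAIM (what is proved, stated in full; the proofs are below) =====
def Claim_equal_guess_password : Prop := ∀ (real : String), Dom_guess_password real → Pre_guess_password real → Spec_guess_password real (guess_password real)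

-- ===== LEMMAS AND PROOFS =====

-- rank digit: index of c in the alphabet, as B computes it
def pwIdx (c : Char) : Int := (((PySem.List.index? pwAlphabet c).getD 0 : Nat) : Int)

def pwRank (l : List Char) : Int := l.foldl (fun r c => r * 36 + pwIdx c) 0

def pwGsum : Nat → Int
  | 0 => 0
  | n + 1 => pwGsum n + 36 ^ n

theorem pwRank_shift (l : List Char) (a : Int) :
    l.foldl (fun r c => r * 36 + pwIdx c) a = a * 36 ^ l.length + pwRank l := by
  induction l generalizing a with
  | nil => simp [pwRank]
  | cons c t ih =>
      simp only [List.foldl_cons, List.length_cons, pwRank]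
      rw [ih (a * 36 + pwIdx c), ih (0 * 36 + pwIdx c)]
      ring

theorem searchTuples_miss (real : String) (n : Nat) :
    ∀ (cs pre : List Char) (att : Int),
      ¬ (pre <+: real.toList ∧ real.toList.length = pre.length + n) →
      searchTuples real n cs pre att =
        .inr (att + (if n = 0 then 1 else (cs.length : Int) * 36 ^ (n - 1))) := by
  induction n with
  | zero =>
      intro cs pre att h
      have hne : ¬ (String.ofList pre = real) := by
        intro he
        apply h
        subst he
        simp [String.toList_ofList]
      simp [searchTuples, hne]
  | succ n ih =>
      intro cs pre att h
      induction cs generalizing att with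
      | nil => simp [searchTuples]
      | cons c rest ihc =>
          have hsub : ¬ ((pre ++ [c]) <+: real.toList ∧ real.toList.length = (pre ++ [c]).length + n) := by
            rintro ⟨hp, hl⟩
            exact h ⟨(List.prefix_append pre [c]).trans hp, by simp at hl ⊢; omega⟩
          have hcnt : (if n = 0 then (1:Int) else (pwAlphabet.length : Int) * 36 ^ (n - 1)) = 36 ^ n := by
            rcases n with _ | m
            · simp
            · have : pwAlphabet.length = 36 := by decide
              simp [this]
              ring
          rw [searchTuples, ih pwAlphabet (pre ++ [c]) att hsub, hcnt]
          dsimp only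
          rw [ihc (att + 36 ^ n)]
          simp
          ring

theorem index?_getD_eq_idxOf (l : List Char) (c : Char) (hc : c ∈ l) :
    ((PySem.List.index? l c).getD 0 : Nat) = l.idxOf c := by
  rw [PySem.List.index?_eq_idxOf?]
  induction l with
  | nil => simp at hc
  | cons d t ih =>
    by_cases hd : d = c
    · subst hd; simp [List.idxOf?_cons]
    · have hct : c ∈ t := by
        rcases List.mem_cons.mp hc with h | h
        · exact absurd h.symm hd
        · exact h
      have hne : (d == c) = false := by simp [hd]
      simp only [List.idxOf?_cons, List.idxOf_cons, hne, cond_false]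
      have hsome : (List.idxOf? c t).isSome := List.isSome_idxOf?.mpr hct
      cases hx : List.idxOf? c t with
      | none => simp [hx] at hsome
      | some k =>
        simp [hx] at ih ⊢
        exact ih hct

theorem pwIdx_mem (c : Char) (hc : c ∈ pwAlphabet) : pwIdx c = (pwAlphabet.idxOf c : Int) := by
  simpa [pwIdx] using congrArg (Nat.cast : Nat → Int) (index?_getD_eq_idxOf pwAlphabet c hc)

theorem pw_prefix_ne (pre : List Char) (d c : Char) (w : List Char) (hd : d ≠ c) :
    ¬ ((pre ++ [d]) <+: (pre ++ c :: w)) := by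
  rintro ⟨t, ht⟩
  rw [List.append_assoc] at ht
  have h2 := List.append_cancel_left ht
  simp at h2
  exact hd h2.1

theorem searchTuples_hit (real : String) (n : Nat) :
    ∀ (cs pre : List Char) (c : Char) (w : List Char) (att : Int),
      real.toList = pre ++ c :: w → w.length = n → c ∈ cs →
      (∀ x ∈ w, x ∈ pwAlphabet) →
      searchTuples real (n + 1) cs pre att =
        .inl (some (real, att + (cs.idxOf c : Int) * 36 ^ n + pwRank w + 1)) := by
  induction n with
  | zero =>
      intro cs pre c w att hR hw hc hall
      have hw0 : w = [] := List.eq_nil_of_length_eq_zero hw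
      subst hw0
      revert hc
      induction cs generalizing att with
      | nil => intro hc; simp at hc
      | cons d rest ihc =>
          intro hc
          rw [searchTuples]
          by_cases hd : d = c
          · subst hd
            have heq : String.ofList (pre ++ [d]) = real := by
              rw [← hR]
              exact String.ofList_toList
            rw [searchTuples]
            simp [heq, pwRank]
          · have hmiss := searchTuples_miss real 0 pwAlphabet (pre ++ [d]) att
              (by rintro ⟨hp, _⟩; exact pw_prefix_ne pre d c [] hd (hR ▸ hp))
            rw [hmiss]
            dsimp only
            have hcr : c ∈ rest := by
              rcases List.mem_cons.mp hc with h | h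
              · exact absurd h.symm hd
              · exact h
            have hcnt0 : (if 0 = 0 then (1:Int) else (pwAlphabet.length : Int) * 36 ^ (0 - 1)) = 1 := by norm_num
            rw [hcnt0, ihc (att + 1) hcr]
            have hne : (d == c) = false := by simp [hd]
            simp only [List.idxOf_cons, hne, cond_false]
            push_cast
            ring_nf
  | succ m ih =>
      intro cs pre c w att hR hw hc hall
      obtain ⟨c', w'', rfl⟩ : ∃ c' w'', w = c' :: w'' := by
        cases w with
        | nil => simp at hw
        | cons a b => exact ⟨a, b, rfl⟩
      revert hc
      induction cs generalizing att with
      | nil => intro hc; simp at hc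
      | cons d rest ihc =>
          intro hc
          rw [searchTuples]
          by_cases hd : d = c
          · subst hd
            have hsub := ih pwAlphabet (pre ++ [d]) c' w'' att
              (by rw [hR]; simp)
              (by simpa using hw)
              (hall c' (by simp))
              (fun x hx => hall x (by simp [hx]))
            rw [hsub]
            dsimp only
            have hrank : pwRank (c' :: w'') = pwIdx c' * 36 ^ w''.length + pwRank w'' := by
              have := pwRank_shift w'' (0 * 36 + pwIdx c')
              simpa [pwRank] using this
            have hlen : w''.length = m := by simpa using hw
            rw [pwIdx_mem c' (hall c' (by simp))] at hrank
            simp only [List.idxOf_cons, beq_self_eq_true, cond_true, hrank, hlen]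
            push_cast
            ring_nf
          · have hmiss := searchTuples_miss real (m + 1) pwAlphabet (pre ++ [d]) att
              (by rintro ⟨hp, _⟩; exact pw_prefix_ne pre d c (c' :: w'') hd (hR ▸ hp))
            rw [hmiss]
            dsimp only
            have hcr : c ∈ rest := by
              rcases List.mem_cons.mp hc with h | h
              · exact absurd h.symm hd
              · exact h
            have hcnt : (if m + 1 = 0 then (1:Int) else (pwAlphabet.length : Int) * 36 ^ (m + 1 - 1)) = 36 ^ (m + 1) := by
              have : pwAlphabet.length = 36 := by decide
              simp [this]
              ring
            rw [hcnt, ihc (att + 36 ^ (m + 1)) hcr]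
            have hne : (d == c) = false := by simp [hd]
            simp only [List.idxOf_cons, hne, cond_false]
            push_cast
            ring_nf

theorem pwOuter_find (real : String)
    (hall : ∀ c ∈ real.toList, c ∈ pwAlphabet) :
    ∀ (b a : Nat) (att : Int), a ≤ real.toList.length → real.toList.length < a + b →
      pwOuter real (List.range' a b) att =
        some (real, att + (pwGsum real.toList.length - pwGsum a) + pwRank real.toList + 1) := by
  intro b
  induction b with
  | zero => intro a att h1 h2; omega
  | succ b ih =>
      intro a att h1 h2
      simp only [List.range']
      rw [pwOuter]
      by_cases ha : a = real.toList.length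
      · subst ha
        cases hRl : real.toList with
        | nil =>
            have heq : String.ofList ([] : List Char) = real := by
              rw [← hRl]; exact String.ofList_toList
            simp only [List.length_nil]
            rw [searchTuples]
            simp [heq, pwRank, pwGsum]
        | cons c w =>
            have hc : c ∈ pwAlphabet := hall c (by rw [hRl]; simp)
            have hwall : ∀ x ∈ w, x ∈ pwAlphabet := fun x hx => hall x (by rw [hRl]; simp [hx])
            have hhit := searchTuples_hit real w.length pwAlphabet [] c w att
              (by simpa using hRl) rfl hc hwall
            simp only [List.length_cons]
            rw [hhit]
            dsimp only
            have hrank : pwRank (c :: w) = pwIdx c * 36 ^ w.length + pwRank w := by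
              have := pwRank_shift w (0 * 36 + pwIdx c)
              simpa [pwRank] using this
            rw [pwIdx_mem c hc] at hrank
            rw [hrank]
            simp only [sub_self]
            ring_nf
      · have hlt : a < real.toList.length := by omega
        have hmiss := searchTuples_miss real a pwAlphabet [] att
          (by rintro ⟨_, hl⟩; simp only [List.length_nil, Nat.zero_add] at hl; omega)
        rw [hmiss]
        dsimp only
        have hcnt : (if a = 0 then (1:Int) else (pwAlphabet.length : Int) * 36 ^ (a - 1)) = 36 ^ a := by
          rcases a with _ | k
          · simp
          · have h36 : pwAlphabet.length = 36 := by decide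
            simp [h36]
            ring
        rw [hcnt, ih (a + 1) (att + 36 ^ a) (by omega) (by omega)]
        have hstep : pwGsum (a + 1) = pwGsum a + 36 ^ a := rfl
        rw [hstep]
        ring_nf

theorem pwGsum_mul (n : Nat) : (36:Int) ^ n - 1 = 35 * pwGsum n := by
  induction n with
  | zero => simp [pwGsum]
  | succ m ih =>
      rw [pwGsum, pow_succ]
      linarith

-- ===== VERDICT (by name: the statement is the Claim_ definition above) =====
theorem guess_password_spec : Claim_equal_guess_password := by
  intro real hdom hpre
  obtain ⟨hlen, hallb⟩ := hpre
  have hall : ∀ c ∈ real.toList, c ∈ pwAlphabet := by simpa using hallb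
  unfold Spec_guess_password
  have hA : guess_password real =
      some (real, pwGsum real.toList.length + pwRank real.toList + 1) := by
    unfold guess_password
    rw [List.range_eq_range']
    rw [pwOuter_find real hall 9 0 0 (by omega) (by omega)]
    simp [pwGsum]
  have hdiv : PySem.Int.floordiv ((36:Int) ^ real.toList.length - 1) 35 = pwGsum real.toList.length := by
    rw [PySem.Int.floordiv_eq_ediv_of_pos (by norm_num)]
    rw [pwGsum_mul]
    exact Int.mul_ediv_cancel_left _ (by norm_num)
  rw [hA]
  unfold guess_password_alt
  rw [if_pos ⟨hlen, hall⟩]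
  simp only [hdiv]
  have hrk : real.toList.foldl
      (fun r c => r * 36 + (((PySem.List.index? pwAlphabet c).getD 0 : Nat) : Int)) 0 =
      pwRank real.toList := rfl
  rw [hrk]
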